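-- pv_equiv track=rewrite | github.com/Minwook-Byun/BoramClaw | wrapup_evidence.py | _parse_status_lines
-- ===== SOURCE A (Python) =====
-- def _parse_status_lines(lines: list[str]) -> tuple[int, int, int, list[str]]:
--     staged = 0
--     modified = 0
--     untracked = 0
--     changed_files: list[str] = []
--
--     for raw_line in lines:
--         line = raw_line.rstrip()
--         if not line or line.startswith("## "):
--             continue
--         if line.startswith("?? "):
--             untracked += 1
--             changed_files.append(line[3:].strip())
--             continue
--         if len(line) < 4:
--             continue
--         x = line[0]
--         y = line[1]
--         file_part = line[3:].strip()
--         if "->" in file_part: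
--             file_part = file_part.split("->", 1)[1].strip()
--         changed_files.append(file_part)
--         if x not in {" ", "?"}:
--             staged += 1
--         if y not in {" ", "?"} or x in {"M", "A", "R", "C", "D"}:
--             modified += 1
--
--     deduped_files = list(dict.fromkeys(item for item in changed_files if item))
--     return staged, modified, untracked, deduped_files
-- ===== SOURCE B (Python) =====
-- def _classify(raw_line):
--     """Parse one git-status line into a record (code, file) or None.
--
--     code is (x, y) for a tracked entry and None for an untracked one."""
--     line = raw_line.rstrip()
--     if not line or line.startswith("## "):
--         return None
--     if line.startswith("?? "):
--         return (None, line[3:].strip())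
--     if len(line) < 4:
--         return None
--     file_part = line[3:].strip()
--     if "->" in file_part:
--         file_part = file_part.split("->", 1)[1].strip()
--     return ((line[0], line[1]), file_part)
--
--
-- def _parse_status_lines(lines: list[str]) -> tuple[int, int, int, list[str]]:
--     # Phase 1: parse every line into a record; phase 2: derive counts and files.
--     records = [r for r in map(_classify, lines) if r is not None]
--     staged = sum(1 for code, _ in records
--                  if code is not None and code[0] not in " ?")
--     modified = sum(1 for code, _ in records
--                    if code is not None and (code[1] not in " ?" or code[0] in "MARCD"))
--     untracked = sum(1 for code, _ in records if code is None)
--     files = []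
--     for _, f in records:
--         if f and f not in files:
--             files.append(f)
--     return staged, modified, untracked, files
-- ===== Notes on version B (the rewrite author's own statement) =====
-- stated objective: alternative
-- what changed: Splits A's single counting loop into a pure per-line parser producing records, then derives each counter as an independent count over the records and builds the deduplicated file list with an order-preserving membership scan instead of dict.fromkeys over an accumulated list.
import Mathlib
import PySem

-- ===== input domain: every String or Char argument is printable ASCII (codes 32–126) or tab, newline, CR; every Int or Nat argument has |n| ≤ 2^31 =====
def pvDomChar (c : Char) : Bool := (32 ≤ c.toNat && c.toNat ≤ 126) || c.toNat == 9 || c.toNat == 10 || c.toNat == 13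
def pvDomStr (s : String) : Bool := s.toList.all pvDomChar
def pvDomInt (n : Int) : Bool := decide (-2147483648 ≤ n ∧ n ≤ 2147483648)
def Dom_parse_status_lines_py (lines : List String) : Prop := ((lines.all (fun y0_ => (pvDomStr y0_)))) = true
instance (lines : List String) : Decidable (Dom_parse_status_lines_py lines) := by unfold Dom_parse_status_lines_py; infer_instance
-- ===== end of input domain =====

-- B separates parsing (one record per relevant line) from counting/dedup; same cost, clearer decomposition.

-- ===== PORT A =====
-- one iteration of A's for-loop over (staged, modified, untracked, changed_files)
def pvStepA (acc : Int × Int × Int × List String) (raw_line : String) :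
    Int × Int × Int × List String :=
  let line := PySem.Str.rstrip raw_line
  if line = "" || PySem.Str.startswith line "## " then acc
  else if PySem.Str.startswith line "?? " then
    (acc.1, acc.2.1, acc.2.2.1 + 1,
      acc.2.2.2 ++ [PySem.Str.strip (PySem.Str.slice line (some 3) none)])
  else if PySem.Str.len line < 4 then acc
  else
    -- indices 0 and 1 are in range: the previous guard ensures len(line) ≥ 4
    let x := (PySem.Str.pyGet? line 0).getD ' '
    let y := (PySem.Str.pyGet? line 1).getD ' '
    let fp0 := PySem.Str.strip (PySem.Str.slice line (some 3) none)
    -- split("->", 1)[1] is in range because "->" occurs in fp0 on this branch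
    let file_part := if PySem.Str.isIn "->" fp0 then
        PySem.Str.strip (((PySem.Str.splitMax? fp0 "->" 1).getD []).getD 1 "")
      else fp0
    (acc.1 + (if x != ' ' && x != '?' then 1 else 0),
     acc.2.1 + (if (y != ' ' && y != '?') || (x == 'M' || x == 'A' || x == 'R' || x == 'C' || x == 'D') then 1 else 0),
     acc.2.2.1,
     acc.2.2.2 ++ [file_part])

def parse_status_lines_py (lines : List String) : Int × Int × Int × List String :=
  let st := lines.foldl pvStepA (0, 0, 0, [])
  (st.1, st.2.1, st.2.2.1, PySem.List.dedup (st.2.2.2.filter (fun item => item ≠ "")))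

-- ===== PORT B =====
-- _classify: one line -> record (code, file); code = none for an untracked entry
def pvClassify (raw_line : String) : Option (Option (Char × Char) × String) :=
  let line := PySem.Str.rstrip raw_line
  if line = "" || PySem.Str.startswith line "## " then none
  else if PySem.Str.startswith line "?? " then
    some (none, PySem.Str.strip (PySem.Str.slice line (some 3) none))
  else if PySem.Str.len line < 4 then none
  else
    -- indices 0 and 1 are in range: the previous guard ensures len(line) ≥ 4
    let fp0 := PySem.Str.strip (PySem.Str.slice line (some 3) none)
    -- split("->", 1)[1] is in range because "->" occurs in fp0 on this branch
    let file_part := if PySem.Str.isIn "->" fp0 then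
        PySem.Str.strip (((PySem.Str.splitMax? fp0 "->" 1).getD []).getD 1 "")
      else fp0
    some (some ((PySem.Str.pyGet? line 0).getD ' ', (PySem.Str.pyGet? line 1).getD ' '), file_part)

def pvIsStaged (r : Option (Char × Char) × String) : Bool :=
  match r.1 with
  | none => false
  | some (x, _) => x != ' ' && x != '?'

def pvIsModified (r : Option (Char × Char) × String) : Bool :=
  match r.1 with
  | none => false
  | some (x, y) => (y != ' ' && y != '?') || (x == 'M' || x == 'A' || x == 'R' || x == 'C' || x == 'D')

def pvIsUntracked (r : Option (Char × Char) × String) : Bool := r.1.isNone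

def parse_status_lines_py_alt (lines : List String) : Int × Int × Int × List String :=
  let records := lines.filterMap pvClassify
  let staged : Int := records.countP pvIsStaged
  let modified : Int := records.countP pvIsModified
  let untracked : Int := records.countP pvIsUntracked
  let files := records.foldl
    (fun acc r => if r.2 ≠ "" ∧ r.2 ∉ acc then acc ++ [r.2] else acc) []
  (staged, modified, untracked, files)

-- ===== PRECONDITION & SPEC =====
def Spec_parse_status_lines_py (lines : List String) (out : Int × Int × Int × List String) : Prop := out = parse_status_lines_py_alt lines
instance (lines : List String) (out : Int × Int × Int × List String) : Decidable (Spec_parse_status_lines_py lines out) := by unfold Spec_parse_status_lines_py; infer_instance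

-- ===== CLAIM (what is proved, stated in full; the proofs are below) =====
def Claim_equal_parse_status_lines_py : Prop := ∀ (lines : List String), Dom_parse_status_lines_py lines → Spec_parse_status_lines_py lines (parse_status_lines_py lines)

-- ===== LEMMAS AND PROOFS =====

-- A's loop body, expressed through B's classifier
lemma pvStepA_classify (acc : Int × Int × Int × List String) (raw : String) :
    pvStepA acc raw =
      match pvClassify raw with
      | none => acc
      | some r =>
        (acc.1 + (if pvIsStaged r then 1 else 0),
         acc.2.1 + (if pvIsModified r then 1 else 0),
         acc.2.2.1 + (if pvIsUntracked r then 1 else 0),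
         acc.2.2.2 ++ [r.2]) := by
  simp only [pvStepA, pvClassify]
  split_ifs with h1 h2 h3 <;>
    simp_all [pvIsStaged, pvIsModified, pvIsUntracked]

-- A's whole fold, expressed through B's records
lemma pvFoldA (lines : List String) (s m u : Int) (fs : List String) :
    lines.foldl pvStepA (s, m, u, fs) =
      (s + ((lines.filterMap pvClassify).countP pvIsStaged : Int),
       m + ((lines.filterMap pvClassify).countP pvIsModified : Int),
       u + ((lines.filterMap pvClassify).countP pvIsUntracked : Int),
       fs ++ (lines.filterMap pvClassify).map (·.2)) := by
  induction lines generalizing s m u fs with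
  | nil => simp
  | cons raw rest ih =>
    rw [List.foldl_cons, pvStepA_classify]
    cases h : pvClassify raw with
    | none => simp [h, ih]
    | some r =>
      simp only [h, ih, List.filterMap_cons, List.countP_cons, List.map_cons,
        Prod.mk.injEq]
      refine ⟨?_, ?_, ?_, by simp⟩
      · cases pvIsStaged r <;> simp; omega
      · cases pvIsModified r <;> simp; omega
      · cases pvIsUntracked r <;> simp; omega

-- B's membership-building loop is dict.fromkeys of the nonempty entries
lemma pvDedupFold (l : List String) (acc : List String) :
    l.foldl (fun acc f => if f ≠ "" ∧ f ∉ acc then acc ++ [f] else acc) acc =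
      (l.filter (fun f => f ≠ "")).foldl PySem.Set.add acc := by
  induction l generalizing acc with
  | nil => rfl
  | cons f rest ih =>
    by_cases hf : f = ""
    · simp [hf, ih]
    · by_cases hm : f ∈ acc <;>
        simp [hf, hm, ih, PySem.Set.add, PySem.Set.contains]

-- ===== VERDICT (by name: the statement is the Claim_ definition above) =====
theorem parse_status_lines_py_spec : Claim_equal_parse_status_lines_py := by
  intro lines _
  show parse_status_lines_py lines = parse_status_lines_py_alt lines
  unfold parse_status_lines_py parse_status_lines_py_alt
  rw [pvFoldA]
  simp only [zero_add]
  refine Prod.ext rfl (Prod.ext rfl (Prod.ext rfl ?_))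
  show PySem.List.dedup _ = _
  rw [List.foldl_map (f := fun (r : Option (Char × Char) × String) => r.2)
        (g := fun acc f => if f ≠ "" ∧ f ∉ acc then acc ++ [f] else acc) |>.symm]
  rw [pvDedupFold]
  simp [PySem.List.dedup_eq_ofList, PySem.Set.ofList_eq_foldl]
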